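-- pv_equiv track=rewrite | github.com/SagarDhok/CodeDaily | GeeksOfGeeks/day-69.py | common_digits
-- ===== SOURCE A (Python) =====
-- def common_digits(nums):
--      st =set()
--      for i in nums:
--       n = i
--       while n>0:
--         d = n%10
--         if d not in st:
--           st.add(d)
--         n=n//10
--      return sorted(st)
-- ===== SOURCE B (Python) =====
-- def common_digits(nums):
--     def has_digit(x, d):
--         while x > 0:
--             if x % 10 == d:
--                 return True
--             x //= 10
--         return False
--     return [d for d in range(10) if any(has_digit(x, d) for x in nums)]
-- ===== Notes on version B (the rewrite author's own statement) =====
-- stated objective: alternative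
-- what changed: Instead of accumulating digits into a set and sorting it, B tests each candidate digit 0-9 for presence in some positive number, producing the result already in order with no set and no sort.
import Mathlib
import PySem

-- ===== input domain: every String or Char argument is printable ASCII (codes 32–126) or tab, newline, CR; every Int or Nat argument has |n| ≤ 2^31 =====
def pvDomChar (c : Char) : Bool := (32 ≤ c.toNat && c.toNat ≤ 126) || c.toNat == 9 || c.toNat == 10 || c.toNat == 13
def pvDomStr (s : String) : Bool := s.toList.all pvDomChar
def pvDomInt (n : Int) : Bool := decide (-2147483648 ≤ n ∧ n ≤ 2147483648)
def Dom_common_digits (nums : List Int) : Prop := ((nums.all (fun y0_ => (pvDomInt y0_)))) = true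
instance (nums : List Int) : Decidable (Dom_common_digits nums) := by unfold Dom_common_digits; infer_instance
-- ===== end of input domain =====

-- B replaces A's set-accumulation-then-sort by a presence test for each candidate digit 0..9,
-- emitting the answer already in order (alternative decomposition, same exact result).

-- ===== PORT A =====
-- the 'while n>0' loop of A: pull off digits with % and //, adding each unseen one to the set
def pvDigitLoopA (n : Int) (st : PySem.Set Int) : PySem.Set Int :=
  if h : n > 0 then
    pvDigitLoopA (PySem.Int.floordiv n 10)
      (if (PySem.Int.mod n 10) ∈ st then st else PySem.Set.add st (PySem.Int.mod n 10))
  else st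
termination_by n.toNat
decreasing_by
  rw [PySem.Int.floordiv_eq_ediv_of_pos (by norm_num)]; omega

def common_digits (nums : List Int) : List Int :=
  PySem.List.sorted (nums.foldl (fun st i => pvDigitLoopA i st) PySem.Set.empty) (fun x => x) false

-- ===== PORT B =====
-- B's helper: while x > 0: if x % 10 == d: return True; x //= 10
def pvHasDigit (x d : Int) : Bool :=
  if h : x > 0 then
    if PySem.Int.mod x 10 = d then true else pvHasDigit (PySem.Int.floordiv x 10) d
  else false
termination_by x.toNat
decreasing_by
  rw [PySem.Int.floordiv_eq_ediv_of_pos (by norm_num)]; omega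

def common_digits_alt (nums : List Int) : List Int :=
  (PySem.List.pyRange 0 10 1).filter (fun d => nums.any (fun x => pvHasDigit x d))

-- ===== PRECONDITION & SPEC =====
def Spec_common_digits (nums : List Int) (out : List Int) : Prop := out = common_digits_alt nums
instance (nums : List Int) (out : List Int) : Decidable (Spec_common_digits nums out) := by unfold Spec_common_digits; infer_instance

-- ===== CLAIM (what is proved, stated in full; the proofs are below) =====
def Claim_equal_common_digits : Prop := ∀ (nums : List Int), Dom_common_digits nums → Spec_common_digits nums (common_digits nums)

-- ===== LEMMAS AND PROOFS =====

-- membership in A's inner-loop result = old membership or B's presence test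
theorem pv_mem_digitLoopA (n d : Int) (st : PySem.Set Int) :
    d ∈ pvDigitLoopA n st ↔ d ∈ st ∨ pvHasDigit n d = true := by
  fun_induction pvDigitLoopA n st with
  | case1 n st h ih =>
      rw [pvHasDigit, dif_pos h]
      simp only [dite_eq_ite] at ih
      have hm : (d ∈ if PySem.Int.mod n 10 ∈ st then st else PySem.Set.add st (PySem.Int.mod n 10)) ↔ d ∈ st ∨ d = PySem.Int.mod n 10 := by
        split
        · next hmem => exact ⟨Or.inl, fun h' => h'.elim id (fun he => he ▸ hmem)⟩
        · next hmem => exact PySem.Set.mem_add st _ d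
      rw [ih, hm]
      constructor
      · rintro ((hs | he) | hr)
        · exact Or.inl hs
        · simp [he]
        · right
          split
          · rfl
          · exact hr
      · rintro (hs | hrest)
        · exact Or.inl (Or.inl hs)
        · by_cases he : PySem.Int.mod n 10 = d
          · exact Or.inl (Or.inr he.symm)
          · rw [if_neg he] at hrest
            exact Or.inr hrest
  | case2 n st h =>
      rw [pvHasDigit]
      simp [h]

theorem pv_hasDigit_bounds (x d : Int) (h : pvHasDigit x d = true) : 0 ≤ d ∧ d < 10 := by
  fun_induction pvHasDigit x d with
  | case1 x hx he => exact he ▸ ⟨PySem.Int.mod_nonneg x (by norm_num), PySem.Int.mod_lt x (by norm_num)⟩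
  | case2 x hx he ih => exact ih h
  | case3 x hx => simp at h

theorem pv_nodup_digitLoopA (n : Int) (st : PySem.Set Int) (h : st.Nodup) :
    (pvDigitLoopA n st).Nodup := by
  fun_induction pvDigitLoopA n st with
  | case1 n st hn ih =>
      apply ih
      by_cases hmem : PySem.Int.mod n 10 ∈ st
      · simp only [hmem]; exact h
      · simp only [hmem]; exact PySem.Set.nodup_add st (PySem.Int.mod n 10) h
  | case2 n st hn => exact h

theorem pv_mem_fold (nums : List Int) (d : Int) (st : PySem.Set Int) :
    d ∈ nums.foldl (fun st i => pvDigitLoopA i st) st ↔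
      d ∈ st ∨ ∃ x ∈ nums, pvHasDigit x d = true := by
  induction nums generalizing st with
  | nil => simp
  | cons y ys ih =>
      simp only [List.foldl_cons, ih, pv_mem_digitLoopA, List.mem_cons]
      constructor
      · rintro ((h | h) | ⟨x, hx, hd⟩)
        · exact Or.inl h
        · exact Or.inr ⟨y, Or.inl rfl, h⟩
        · exact Or.inr ⟨x, Or.inr hx, hd⟩
      · rintro (h | ⟨x, (rfl | hx), hd⟩)
        · exact Or.inl (Or.inl h)
        · exact Or.inl (Or.inr hd)
        · exact Or.inr ⟨x, hx, hd⟩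

theorem pv_nodup_fold (nums : List Int) (st : PySem.Set Int) (h : st.Nodup) :
    (nums.foldl (fun st i => pvDigitLoopA i st) st).Nodup := by
  induction nums generalizing st with
  | nil => exact h
  | cons y ys ih => exact ih _ (pv_nodup_digitLoopA y st h)

theorem pv_range10 : PySem.List.pyRange 0 10 1 = [0, 1, 2, 3, 4, 5, 6, 7, 8, 9] := by rfl

-- ===== VERDICT (by name: the statement is the Claim_ definition above) =====
theorem common_digits_spec : Claim_equal_common_digits := by
  intro nums _
  unfold Spec_common_digits common_digits common_digits_alt
  apply PySem.List.sorted_eq_of_perm_of_pairwise_lt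
  · rw [List.perm_ext_iff_of_nodup]
    · intro d
      rw [List.mem_filter, pv_mem_fold, pv_range10]
      simp only [PySem.Set.empty, List.not_mem_nil, false_or, List.any_eq_true]
      constructor
      · rintro ⟨hr, x, hx, hd⟩
        exact ⟨x, hx, hd⟩
      · rintro ⟨x, hx, hd⟩
        refine ⟨?_, x, hx, hd⟩
        obtain ⟨h0, h1⟩ := pv_hasDigit_bounds x d hd
        simp only [List.mem_cons, List.not_mem_nil, or_false]
        omega
    · exact List.Nodup.filter _ (by rw [pv_range10]; decide)
    · exact pv_nodup_fold nums PySem.Set.empty List.nodup_nil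
  · exact List.Pairwise.filter _ (by rw [pv_range10]; decide)
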